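-- pv_equiv track=rewrite | github.com/qwrtln/Advent-of-Code | 2023/13.py | find_axis
-- ===== SOURCE A (Python) =====
-- def is_symmetrical(elements, index):
--     to_check = elements[: index + 1]
--     first, *remaining, last = to_check
--     while remaining:
--         if first != last:
--             return False
--         first, *remaining, last = remaining
--     return first == last
--
-- def find_axis(elements):
--     first, *remaining, last = elements
--     from_beginning = []
--     to_end = []
--     if first in remaining:
--         from_beginning = [
--             i for i, x in enumerate(remaining, 1) if x == first and i % 2 == 1
--         ]
--     if last in remaining:
--         to_end = [
--             i
--             for i, x in enumerate(remaining, 1)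
--             if x == last and (len(elements) - i) % 2 == 0
--         ]
--     results = []
--     for candidate in from_beginning:
--         if is_symmetrical(elements, candidate):
--             index = candidate // 2 + 1
--             results.append(index)
--     for candidate in to_end:
--         if is_symmetrical(elements[::-1], len(elements) - candidate - 1):
--             to_add = (len(elements) - candidate) / 2
--             assert to_add == int(to_add), f"Can't be uneven! {to_add}"
--             results.append(int(candidate + to_add))
--     return results
-- ===== SOURCE B (Python) =====
-- def find_axis(elements):
--     # One direct scan over every possible axis position p (mirror line between
--     # index p-1 and p): the reflection holds iff the block left of p, reversed,
--     # equals the block right of p, truncated to the shorter side.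
--     n = len(elements)
--     results = []
--     for p in range(1, n):
--         k = min(p, n - p)
--         if elements[p - k:p] == elements[p:p + k][::-1]:
--             results.append(p)
--     return results
-- ===== Notes on version B (the rewrite author's own statement) =====
-- stated objective: simpler
-- what changed: B replaces A's two candidate scans (matching the first/last element with parity filters, then re-checking each candidate by repeatedly unpacking first/last pairs, plus index arithmetic through floats) by one direct scan over all axis positions comparing the reversed left block with the right block via slices.
-- intended difference: On even-length lists that equal their own reverse (a mirror exactly at the centre), A misses the centre axis n/2 because its candidate enumeration never considers the last element, so A returns the list of axes without n/2; B includes n/2, which is a genuine mirror axis and the intended value. — e.g. on find_axis([1, 1]): A returns [], B returns [1]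
import Mathlib
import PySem

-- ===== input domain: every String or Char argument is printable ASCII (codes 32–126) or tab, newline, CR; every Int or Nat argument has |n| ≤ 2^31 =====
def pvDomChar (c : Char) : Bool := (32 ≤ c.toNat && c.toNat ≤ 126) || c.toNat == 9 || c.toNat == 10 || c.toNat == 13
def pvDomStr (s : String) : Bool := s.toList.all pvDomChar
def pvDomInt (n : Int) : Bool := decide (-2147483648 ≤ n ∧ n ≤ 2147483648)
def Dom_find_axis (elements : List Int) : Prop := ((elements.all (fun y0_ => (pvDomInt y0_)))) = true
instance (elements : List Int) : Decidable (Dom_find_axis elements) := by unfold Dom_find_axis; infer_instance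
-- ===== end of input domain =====

-- B is one direct scan comparing the reversed left block with the right block at every
-- axis position, replacing A's two first/last-candidate scans with pairwise re-checks;
-- on even-length palindromic inputs B additionally reports the centre axis (see D_ below).

-- ===== PORT A =====
-- Python's `while remaining: … ; first, *remaining, last = remaining` loop of
-- is_symmetrical.  Every call site passes a list of even length (the parity filters in
-- find_axis guarantee it), so the one-element arm (where Python would raise) is unreachable.
def symChop : List Int → Bool
  | [] => true
  | [_] => true
  | a :: b :: rest =>
      if (b :: rest).dropLast.isEmpty then a == (b :: rest).getLast (by simp)
      else if a != (b :: rest).getLast (by simp) then false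
      else symChop ((b :: rest).dropLast)
  termination_by l => l.length
  decreasing_by simp [List.length_dropLast]

def is_symmetrical (elements : List Int) (index : Int) : Bool :=
  symChop (PySem.List.slice elements none (some (index + 1)))

def find_axis (elements : List Int) : List Int :=
  match elements with
  | [] => []      -- Python raises ValueError here (outside Pre_)
  | [_] => []     -- Python raises ValueError here (outside Pre_)
  | first :: rest =>
    let lastE := rest.getLast!
    let remaining := rest.dropLast
    let n : Int := elements.length
    let from_beginning : List Int :=
      if first ∈ remaining then
        ((PySem.List.enumerate remaining 1).filter
          (fun ix => ix.2 == first && PySem.Int.mod ix.1 2 == 1)).map Prod.fst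
      else []
    let to_end : List Int :=
      if lastE ∈ remaining then
        ((PySem.List.enumerate remaining 1).filter
          (fun ix => ix.2 == lastE && PySem.Int.mod (n - ix.1) 2 == 0)).map Prod.fst
      else []
    let results₁ := from_beginning.foldl (fun acc candidate =>
        if is_symmetrical elements candidate
        then acc ++ [PySem.Int.floordiv candidate 2 + 1] else acc) []
    -- `(len(elements) - candidate) / 2` is float division, but the parity filter on
    -- to_end guarantees it is integral (the assert never fires) and small, so float
    -- arithmetic is exact and floordiv computes the same value.
    -- `elements[::-1]` is List.reverse (PySem.List.slice?_none_none_neg_one).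
    to_end.foldl (fun acc candidate =>
        if is_symmetrical elements.reverse (n - candidate - 1)
        then acc ++ [candidate + PySem.Int.floordiv (n - candidate) 2] else acc) results₁

-- ===== PORT B =====
def find_axis_alt (elements : List Int) : List Int :=
  let n : Int := elements.length
  (PySem.List.pyRange 1 n 1).foldl (fun acc p =>
    let k := min p (n - p)
    if PySem.List.slice elements (some (p - k)) (some p)
       == (PySem.List.slice elements (some p) (some (p + k))).reverse
    then acc ++ [p] else acc) []

-- ===== PRECONDITION & SPEC =====
-- A's starred unpacking `first, *remaining, last = elements` raises ValueError on lists
-- of fewer than 2 elements; Pre_ excludes exactly those.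
def Pre_find_axis (elements : List Int) : Prop := 2 ≤ elements.length
instance (elements : List Int) : Decidable (Pre_find_axis elements) := by unfold Pre_find_axis; infer_instance
def pvWitness_find_axis : List Int := [1, 2, 1, 5]

-- On even-length lists that equal their own reverse (a mirror exactly at the centre),
-- A misses the centre axis n/2 because its candidate enumeration never considers the
-- last element, so A returns the list of axes without n/2; B includes n/2, which is a
-- genuine mirror axis and the intended value.
def D_find_axis (elements : List Int) : Prop :=
  2 ≤ elements.length ∧ elements.length % 2 = 0 ∧ elements.reverse = elements
instance (elements : List Int) : Decidable (D_find_axis elements) := by unfold D_find_axis; infer_instance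

def Spec_find_axis (elements : List Int) (out : List Int) : Prop :=
  ¬ D_find_axis elements → out = find_axis_alt elements
instance (elements : List Int) (out : List Int) : Decidable (Spec_find_axis elements out) := by unfold Spec_find_axis; infer_instance

def pvDiffWitness_find_axis : List Int := [1, 1]
def pvDiffWitnessOut_find_axis : (List Int) × (List Int) := ([], [1])

-- ===== CLAIM (what is proved, stated in full; the proofs are below) =====
def Claim_unchanged_find_axis : Prop := ∀ (elements : List Int), Dom_find_axis elements → Pre_find_axis elements → Spec_find_axis elements (find_axis elements)
def Claim_changed_find_axis : Prop := Dom_find_axis (pvDiffWitness_find_axis) ∧ Pre_find_axis (pvDiffWitness_find_axis) ∧ D_find_axis (pvDiffWitness_find_axis) ∧ find_axis (pvDiffWitness_find_axis) = pvDiffWitnessOut_find_axis.1 ∧ find_axis_alt (pvDiffWitness_find_axis) = pvDiffWitnessOut_find_axis.2 ∧ pvDiffWitnessOut_find_axis.1 ≠ pvDiffWitnessOut_find_axis.2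
def Claim_exact_find_axis : Prop := ∀ (elements : List Int), Dom_find_axis elements → Pre_find_axis elements → D_find_axis elements → find_axis elements ≠ find_axis_alt elements

-- ===== LEMMAS AND PROOFS =====

theorem palin_cons_concat (a lst : Int) (rem : List Int) :
    (a :: (rem ++ [lst])).reverse = a :: (rem ++ [lst]) ↔ lst = a ∧ rem.reverse = rem := by
  simp only [List.reverse_cons, List.reverse_append, List.reverse_cons, List.reverse_nil,
    List.nil_append, List.cons_append, List.cons.injEq]
  constructor
  · rintro ⟨rfl, h⟩
    exact ⟨rfl, List.append_cancel_right h⟩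
  · rintro ⟨rfl, h⟩
    exact ⟨rfl, by rw [h]⟩

theorem symChop_eq (t : List Int) (h : t.length % 2 = 0) :
    symChop t = decide (t.reverse = t) := by
  fun_induction symChop t with
  | case1 => simp
  | case2 a => simp at h
  | case3 a b rest hemp =>
      have hr : rest = [] := by
        cases rest with
        | nil => rfl
        | cons c t => simp at hemp
      subst hr
      simp only [List.getLast_singleton, List.reverse_cons, List.reverse_nil, List.nil_append,
        List.cons_append, List.cons.injEq, and_true]
      by_cases hab : a = b
      · subst hab; simp
      · simp [hab, fun h : b = a => hab h.symm]
  | case4 a b rest hemp hne =>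
      have hdec : b :: rest = (b :: rest).dropLast ++ [(b :: rest).getLast (by simp)] :=
        (List.dropLast_append_getLast (by simp)).symm
      rw [show (a :: b :: rest) = a :: ((b :: rest).dropLast ++ [(b :: rest).getLast (by simp)]) from by rw [← hdec]]
      rw [show (decide ((a :: ((b :: rest).dropLast ++ [(b :: rest).getLast (by simp)])).reverse = a :: ((b :: rest).dropLast ++ [(b :: rest).getLast (by simp)])) : Bool) = decide ((b :: rest).getLast (by simp) = a ∧ (b :: rest).dropLast.reverse = (b :: rest).dropLast) from by rw [decide_eq_decide]; exact palin_cons_concat _ _ _]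
      simp only [bne_iff_ne, ne_eq] at hne
      simp only [Bool.false_eq, eq_comm (a := false)]
      simp only [decide_eq_false_iff_not]
      exact fun hc => absurd hc.1.symm hne
  | case5 a b rest hemp hne ih =>
      have hdec : b :: rest = (b :: rest).dropLast ++ [(b :: rest).getLast (by simp)] :=
        (List.dropLast_append_getLast (by simp)).symm
      have hlen : (b :: rest).dropLast.length % 2 = 0 := by
        simp only [List.length_cons, List.length_dropLast] at h ⊢
        omega
      rw [ih hlen]
      rw [show (a :: b :: rest) = a :: ((b :: rest).dropLast ++ [(b :: rest).getLast (by simp)]) from by rw [← hdec]]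
      rw [show (decide ((a :: ((b :: rest).dropLast ++ [(b :: rest).getLast (by simp)])).reverse = a :: ((b :: rest).dropLast ++ [(b :: rest).getLast (by simp)])) : Bool) = decide ((b :: rest).getLast (by simp) = a ∧ (b :: rest).dropLast.reverse = (b :: rest).dropLast) from by rw [decide_eq_decide]; exact palin_cons_concat _ _ _]
      simp only [bne_iff_ne, ne_eq, Decidable.not_not] at hne
      simp [hne]


theorem enum_snd_mem (xs : List Int) (s : Int) (ix : Int × Int)
    (h : ix ∈ PySem.List.enumerate xs s) : ix.2 ∈ xs := by
  induction xs generalizing s with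
  | nil => simp [PySem.List.enumerate_nil] at h
  | cons x t ih =>
      rw [PySem.List.enumerate_cons, List.mem_cons] at h
      rcases h with rfl | h2
      · simp
      · exact List.mem_cons_of_mem _ (ih (s+1) h2)

theorem enum_filter_fst (xs : List Int) (s : Nat) (q : Int × Int → Bool) :
    ((PySem.List.enumerate xs (s : Int)).filter q).map Prod.fst
      = ((List.range' s xs.length).filter
          (fun (i : Nat) => q ((i : Int), xs.getD (i - s) 0))).map (fun (i : Nat) => (i : Int)) := by
  induction xs generalizing s with
  | nil => simp [PySem.List.enumerate_nil]
  | cons x t ih =>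
      rw [PySem.List.enumerate_cons, List.length_cons, List.range'_succ]
      have hs : ((s : Int) + 1) = ((s + 1 : Nat) : Int) := by push_cast; ring
      have hcong : (List.range' (s+1) t.length).filter
            (fun (i : Nat) => q ((i : Int), t.getD (i - (s+1)) 0))
          = (List.range' (s+1) t.length).filter
            (fun (i : Nat) => q ((i : Int), (x :: t).getD (i - s) 0)) := by
        apply List.filter_congr
        intro i hi
        have his : s + 1 ≤ i := (List.mem_range'_1.mp hi).1
        have h1 : i - s = (i - (s+1)) + 1 := by omega
        rw [h1, List.getD_cons_succ]
      have htail : (List.filter q (PySem.List.enumerate t ((s : Int) + 1))).map Prod.fst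
          = ((List.range' (s+1) t.length).filter
              (fun (i : Nat) => q ((i : Int), (x :: t).getD (i - s) 0))).map (fun (i : Nat) => (i : Int)) := by
        rw [hs, ih (s+1), hcong]
      rcases Bool.eq_false_or_eq_true (q ((s : Int), x)) with hq | hq
      · simp [List.filter_cons, Nat.sub_self, hq, htail]
      · simp [List.filter_cons, Nat.sub_self, hq, htail]

theorem filter_odd_range' (m : Nat) :
    (List.range' 1 m).filter (fun c => decide (c % 2 = 1))
      = (List.range' 1 ((m+1)/2)).map (fun p => 2*p - 1) := by
  induction m with
  | zero => rfl
  | succ m ih =>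
      rw [List.range'_concat, List.filter_append, ih]
      by_cases hpar : (1 + m) % 2 = 1
      · have h2 : (m+1+1)/2 = (m+1)/2 + 1 := by omega
        rw [h2, List.range'_concat, List.map_append]
        simp only [List.filter_cons, List.filter_nil]
        have : 2 * (1 + (m+1)/2) - 1 = 1 + m := by omega
        simp [hpar, this]
      · have h2 : (m+1+1)/2 = (m+1)/2 := by omega
        rw [h2]
        simp [hpar]

theorem filter_even_range' (m : Nat) :
    (List.range' 1 m).filter (fun c => decide (c % 2 = 0))
      = (List.range' 1 (m/2)).map (fun p => 2*p) := by
  induction m with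
  | zero => rfl
  | succ m ih =>
      rw [List.range'_concat, List.filter_append, ih]
      by_cases hpar : (1 + m) % 2 = 0
      · have h2 : (m+1)/2 = m/2 + 1 := by omega
        rw [h2, List.range'_concat, List.map_append]
        simp only [List.filter_cons, List.filter_nil]
        have : 2 * (1 + m/2) = 1 + m := by omega
        simp [hpar, this]
      · have h2 : (m+1)/2 = m/2 := by omega
        rw [h2]
        simp [hpar]

theorem palin_split (a b : List Int) (h : b.length = a.length) :
    ((a ++ b).reverse = a ++ b) ↔ b = a.reverse := by
  rw [List.reverse_append]
  constructor
  · intro hh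
    have := List.append_inj hh (by simpa using h)
    rw [← this.1]; simp
  · rintro rfl
    simp

theorem map_filter_congr (f g : Nat → Int) (p q : Nat → Bool) (l : List Nat)
    (h : ∀ x ∈ l, p x = q x ∧ (p x = true → f x = g x)) :
    (l.filter p).map f = (l.filter q).map g := by
  induction l with
  | nil => rfl
  | cons x t ih =>
      have hx := h x List.mem_cons_self
      have ht : ∀ y ∈ t, p y = q y ∧ (p y = true → f y = g y) :=
        fun y hy => h y (List.mem_cons_of_mem _ hy)
      rcases Bool.eq_false_or_eq_true (p x) with hp | hp
      · simp [List.filter_cons, ← hx.1, hp, hx.2 hp, ih ht]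
      · simp [List.filter_cons, ← hx.1, hp, ih ht]

abbrev begP (l : List Int) (p : Nat) : Prop := (l.take (2*p)).reverse = l.take (2*p)
abbrev endP (l : List Int) (p : Nat) : Prop :=
  (l.drop (2*p - l.length)).reverse = l.drop (2*p - l.length)

def canon (l : List Int) : List Int :=
  ((List.range ((l.length-1)/2)).filter (fun j => decide (begP l (j+1)))).map
      (fun j => ((j+1 : Nat) : Int))
  ++ ((List.range ((l.length-1)/2)).filter
        (fun j => decide (endP l (l.length - (l.length-1)/2 + j)))).map
      (fun j => ((l.length - (l.length-1)/2 + j : Nat) : Int))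

-- B's loop test, as a function of the axis position
def condB (l : List Int) (p : Int) : Bool :=
  PySem.List.slice l (some (p - min p ((l.length : Int) - p))) (some p)
    == (PySem.List.slice l (some p) (some (p + min p ((l.length : Int) - p)))).reverse

theorem find_axis_alt_eq_filter (l : List Int) :
    find_axis_alt l = (PySem.List.pyRange 1 (l.length : Int) 1).filter (condB l) := by
  unfold find_axis_alt condB
  rw [PySem.List.foldl_append_if_eq_filter]
  rfl

theorem begP_iff (l : List Int) (p : Nat) (h2 : 2*p ≤ l.length) :
    begP l p ↔ (l.drop p).take p = (l.take p).reverse := by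
  unfold begP
  rw [show 2*p = p + p from by omega, List.take_add]
  exact palin_split _ _ (by simp only [List.length_take, List.length_drop]; omega)

theorem endP_iff (l : List Int) (p : Nat) (hn : l.length ≤ 2*p) (hp : p ≤ l.length) :
    endP l p ↔ l.drop p = ((l.drop (2*p - l.length)).take (l.length - p)).reverse := by
  unfold endP
  have hdec : l.drop (2*p - l.length)
      = (l.drop (2*p - l.length)).take (l.length - p) ++ l.drop p := by
    conv_lhs => rw [← List.take_append_drop (l.length - p) (l.drop (2*p - l.length))]
    rw [List.drop_drop]
    congr 1
    congr 1
    omega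
  constructor
  · intro h
    exact (palin_split ((l.drop (2*p - l.length)).take (l.length - p)) (l.drop p)
      (by simp only [List.length_take, List.length_drop]; omega)).mp (by rw [← hdec]; exact h)
  · intro h
    have h2 := (palin_split ((l.drop (2*p - l.length)).take (l.length - p)) (l.drop p)
      (by simp only [List.length_take, List.length_drop]; omega)).mpr h
    rw [hdec]
    exact h2

theorem condB_lo (l : List Int) (p : Nat) (h1 : 1 ≤ p) (h2 : 2*p < l.length) :
    condB l (p : Int) = decide (begP l p) := by
  unfold condB
  have hmin : min (p : Int) ((l.length : Int) - p) = (p : Int) := by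
    rw [min_eq_left]; omega
  rw [hmin, show ((p : Int) - p) = ((0:Nat) : Int) from by omega,
     show ((p : Int) + p) = ((p : Int) + (p : Nat)) from by push_cast; ring]
  rw [PySem.List.slice_natCast, PySem.List.slice_natCast_add]
  simp only [Nat.sub_zero, List.drop_zero]
  rw [Bool.eq_iff_iff]
  simp only [beq_iff_eq, decide_eq_true_eq]
  rw [begP_iff l p (by omega)]
  constructor
  · intro h; rw [h]; simp
  · intro h; rw [h]; simp

theorem condB_hi (l : List Int) (p : Nat) (hn : l.length < 2*p) (hp : p < l.length) :
    condB l (p : Int) = decide (endP l p) := by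
  unfold condB
  have hmin : min (p : Int) ((l.length : Int) - p) = ((l.length - p : Nat) : Int) := by
    rw [min_eq_right] <;> push_cast <;> omega
  rw [hmin,
    show ((p : Int) - ((l.length - p : Nat) : Int)) = ((2*p - l.length : Nat) : Int) from by push_cast; omega,
    show ((p : Int) + ((l.length - p : Nat) : Int)) = ((l.length : Nat) : Int) from by push_cast; omega]
  rw [PySem.List.slice_natCast, PySem.List.slice_natCast]
  rw [Bool.eq_iff_iff]
  simp only [beq_iff_eq, decide_eq_true_eq]
  have h1 : p - (2*p - l.length) = l.length - p := by omega
  have h2 : (l.drop p).take (l.length - p) = l.drop p := by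
    apply List.take_of_length_le; simp
  rw [h1, h2, endP_iff l p (by omega) (by omega)]
  constructor
  · intro h; rw [h]; simp
  · intro h; rw [h]; simp

theorem condB_mid (l : List Int) (p : Nat) (hn : l.length = 2*p) (h1 : 1 ≤ p) :
    condB l (p : Int) = decide (l.reverse = l) := by
  unfold condB
  have hmin : min (p : Int) ((l.length : Int) - p) = (p : Int) := by
    rw [min_eq_left]; omega
  rw [hmin, show ((p : Int) - p) = ((0:Nat) : Int) from by omega,
     show ((p : Int) + p) = ((p : Int) + (p : Nat)) from by push_cast; ring]
  rw [PySem.List.slice_natCast, PySem.List.slice_natCast_add]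
  simp only [Nat.sub_zero, List.drop_zero]
  rw [Bool.eq_iff_iff]
  simp only [beq_iff_eq, decide_eq_true_eq]
  have htk : (l.drop p).take p = l.drop p := by
    apply List.take_of_length_le; simp; omega
  have htk2 : l.take p ++ l.drop p = l := List.take_append_drop _ _
  have hsplit := palin_split (l.take p) (l.drop p)
    (by simp only [List.length_take, List.length_drop]; omega)
  rw [htk]
  constructor
  · intro h
    rw [← htk2]
    exact hsplit.mpr (by rw [h]; simp)
  · intro h
    have hd := hsplit.mp (by rw [htk2]; exact h)
    rw [hd]; simp

theorem charB (l : List Int) (h2 : 2 ≤ l.length)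
    (hnd : ¬(l.length % 2 = 0 ∧ l.reverse = l)) :
    find_axis_alt l = canon l := by
  rw [find_axis_alt_eq_filter]
  have hK : l.length - 1 = (l.length-1)/2 + (((l.length-1) - 2*((l.length-1)/2)) + (l.length-1)/2) := by omega
  rw [PySem.List.pyRange_one, show ((l.length : Int) - 1).toNat = l.length - 1 from by omega,
      List.filter_map]
  rw [hK, List.range_add, List.range_add, List.map_append, List.map_map]
  rw [List.filter_append, List.filter_append, List.map_append, List.map_append]
  rw [List.filter_map, List.filter_map, List.map_map, List.map_map]
  have hmid : (List.filter
        ((condB l ∘ fun (k : Nat) => 1 + (k : Int)) ∘ fun (x : Nat) => (l.length - 1) / 2 + x)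
        (List.range (l.length - 1 - 2 * ((l.length - 1) / 2)))) = [] := by
    rcases Nat.eq_zero_or_pos ((l.length-1) - 2*((l.length-1)/2)) with he | he
    · rw [he]; rfl
    · have he1 : (l.length-1) - 2*((l.length-1)/2) = 1 := by omega
      have hev : l.length % 2 = 0 := by omega
      rw [he1]
      have hp : (1 + (((l.length-1)/2 + 0 : Nat)):Int) = ((l.length/2 : Nat) : Int) := by
        push_cast; omega
      simp only [List.range_one, List.filter_cons, List.filter_nil, Function.comp_apply]
      rw [show (1 + (((l.length-1)/2 + 0 : Nat) : Int)) = ((l.length/2 : Nat) : Int) from hp]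
      rw [condB_mid l (l.length/2) (by omega) (by omega)]
      rw [if_neg (by simp only [decide_eq_true_eq]; exact fun hc => hnd ⟨hev, hc⟩)]
  rw [hmid, List.map_nil, List.nil_append]
  unfold canon
  congr 1
  · apply map_filter_congr
    intro j hj
    have hjK : j < (l.length-1)/2 := List.mem_range.mp hj
    have hc : (1 + (j:Int)) = ((j+1 : Nat) : Int) := by push_cast; ring
    refine ⟨?_, fun _ => by show (1 + (j:Int)) = ((j+1 : Nat) : Int); push_cast; ring⟩
    simp only [Function.comp_apply, hc]
    exact condB_lo l (j+1) (by omega) (by omega)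
  · apply map_filter_congr
    intro j hj
    have hjK : j < (l.length-1)/2 := List.mem_range.mp hj
    have hc : (1 + (((l.length-1)/2 + ((l.length-1) - 2*((l.length-1)/2) + j) : Nat) : Int))
        = ((l.length - (l.length-1)/2 + j : Nat) : Int) := by push_cast; omega
    refine ⟨?_, fun _ => by simp only [Function.comp_apply]; push_cast; omega⟩
    simp only [Function.comp_apply, hc]
    exact condB_hi l (l.length - (l.length-1)/2 + j) (by omega) (by omega)

theorem isSym_take (l : List Int) (i : Nat) (hodd : (i+1) % 2 = 0) (hi : i < l.length) :
    is_symmetrical l (i : Int) = decide ((l.take (i+1)).reverse = l.take (i+1)) := by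
  unfold is_symmetrical
  rw [show ((i : Int) + 1) = ((i+1 : Nat) : Int) from by push_cast; ring,
      PySem.List.slice_to_natCast]
  exact symChop_eq _ (by simp only [List.length_take]; omega)

theorem isSym_rev (l : List Int) (c : Nat) (hc : c < l.length) (hpar : (l.length - c) % 2 = 0) :
    is_symmetrical l.reverse ((l.length : Int) - c - 1)
      = decide ((l.drop c).reverse = l.drop c) := by
  unfold is_symmetrical
  rw [show ((l.length : Int) - c - 1 + 1) = ((l.length - c : Nat) : Int) from by push_cast; omega,
      PySem.List.slice_to_natCast]
  rw [show l.length - c = l.length - c from rfl]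
  have hrt : l.reverse.take (l.length - c) = (l.drop c).reverse := by
    rw [List.reverse_drop]
  rw [hrt, symChop_eq _ (by simp only [List.length_reverse, List.length_drop]; omega)]
  rw [List.reverse_reverse]
  rw [decide_eq_decide]
  constructor
  · intro h; rw [← h]
  · intro h; exact h.symm

theorem endpoint_beg (l : List Int) (p : Nat) (h1 : 1 ≤ p) (h2 : 2*p ≤ l.length)
    (hb : begP l p) : l.getD (2*p-1) 0 = l.getD 0 0 := by
  have hlen : (l.take (2*p)).length = 2*p := by simp only [List.length_take]; omega
  have h01 : (l.take (2*p))[0]? = (l.take (2*p))[2*p-1]? := by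
    conv_lhs => rw [← hb]
    rw [List.getElem?_reverse (by omega), hlen, Nat.sub_zero]
  have e0 : (l.take (2*p))[0]? = l[0]? := by
    rw [List.getElem?_take_of_lt (by omega)]
  have e1 : (l.take (2*p))[2*p-1]? = l[2*p-1]? := by
    rw [List.getElem?_take_of_lt (by omega)]
  rw [List.getD_eq_getElem?_getD, List.getD_eq_getElem?_getD, ← e0, ← e1, h01]

theorem endpoint_end (l : List Int) (p : Nat) (hn : l.length ≤ 2*p) (hp : p < l.length)
    (he : endP l p) : l.getD (2*p - l.length) 0 = l.getD (l.length - 1) 0 := by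
  have hlen : (l.drop (2*p - l.length)).length = 2*(l.length - p) := by
    simp only [List.length_drop]; omega
  have h01 : (l.drop (2*p - l.length))[0]? = (l.drop (2*p - l.length))[2*(l.length-p)-1]? := by
    conv_lhs => rw [← he]
    rw [List.getElem?_reverse (by omega), hlen, Nat.sub_zero]
  have e0 : (l.drop (2*p - l.length))[0]? = l[2*p - l.length]? := by
    rw [List.getElem?_drop, Nat.add_zero]
  have e1 : (l.drop (2*p - l.length))[2*(l.length-p)-1]? = l[l.length - 1]? := by
    rw [List.getElem?_drop, show 2*p - l.length + (2*(l.length-p)-1) = l.length - 1 from by omega]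
  rw [List.getD_eq_getElem?_getD, List.getD_eq_getElem?_getD, ← e0, ← e1, h01]

theorem dropLast_getD (x : Int) (rest : List Int) (j : Nat) (hj : j < rest.length - 1) :
    (rest.dropLast).getD j 0 = (x :: rest).getD (j+1) 0 := by
  rw [List.getD_eq_getElem?_getD, List.getD_eq_getElem?_getD]
  rw [List.getElem?_dropLast, List.getElem?_cons_succ]
  rw [if_pos hj]

theorem getLastBang_getD (y : Int) (t : List Int) :
    (y :: t).getLast! = (y :: t).getD ((y :: t).length - 1) 0 := by
  have h1 : (y :: t).getLast! = (y :: t).getLast (by simp) := rfl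
  rw [h1, List.getLast_eq_getElem, List.getD_eq_getElem _ _ (by simp)]
  rfl

theorem guard_filter (v : Int) (xs : List Int) (q : Int × Int → Bool)
    (hq : ∀ ix, q ix = true → ix.2 = v) :
    (if v ∈ xs then ((PySem.List.enumerate xs 1).filter q).map Prod.fst else [])
      = ((PySem.List.enumerate xs 1).filter q).map Prod.fst := by
  by_cases h : v ∈ xs
  · rw [if_pos h]
  · rw [if_neg h, List.filter_eq_nil_iff.mpr, List.map_nil]
    intro ix hix hqx
    exact h (hq ix hqx ▸ enum_snd_mem xs 1 ix hix)

theorem enum_filter_fst_one (xs : List Int) (q : Int × Int → Bool) :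
    ((PySem.List.enumerate xs (1 : Int)).filter q).map Prod.fst
      = ((List.range' 1 xs.length).filter
          (fun (i : Nat) => q ((i : Int), xs.getD (i - 1) 0))).map (fun (i : Nat) => (i : Int)) := by
  have h := enum_filter_fst xs 1 q
  rw [show ((1 : Nat) : Int) = (1 : Int) from rfl] at h
  exact h

theorem parity_cast (i : Nat) : (PySem.Int.mod (i : Int) 2 == 1) = decide (i % 2 = 1) := by
  rw [PySem.Int.mod_eq_emod_of_pos (by norm_num), Bool.eq_iff_iff]
  simp only [beq_iff_eq, decide_eq_true_eq]
  omega

theorem parity_cast2 (n i : Nat) (h : i ≤ n) :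
    (PySem.Int.mod ((n : Int) - i) 2 == 0) = decide (i % 2 = n % 2) := by
  rw [show ((n : Int) - i) = ((n - i : Nat) : Int) from by push_cast; omega,
      PySem.Int.mod_eq_emod_of_pos (by norm_num), Bool.eq_iff_iff]
  simp only [beq_iff_eq, decide_eq_true_eq]
  omega

theorem floordiv2_natCast (m : Nat) : PySem.Int.floordiv (m : Int) 2 = ((m/2 : Nat) : Int) := by
  exact_mod_cast PySem.Int.floordiv_natCast m 2

theorem condA1_eq (x y : Int) (t : List Int) (i : Nat) (h1 : 1 ≤ i) (hi : i ≤ t.length) :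
    (is_symmetrical (x::y::t) (i : Int)
        && ((y::t).dropLast.getD (i-1) 0 == x && PySem.Int.mod (i : Int) 2 == 1))
      = (decide (begP (x::y::t) ((i+1)/2)) && decide (i % 2 = 1)) := by
  rw [parity_cast]
  by_cases hpar : i % 2 = 1
  case neg =>
    rw [Bool.eq_iff_iff]
    simp [hpar]
  case pos =>
    have hev : (i+1) % 2 = 0 := by omega
    have hilen : i < (x::y::t).length := by simp; omega
    rw [isSym_take _ i hev hilen,
        dropLast_getD x (y::t) (i-1) (by simp; omega),
        show i - 1 + 1 = i from by omega]
    have hbegiff : begP (x::y::t) ((i+1)/2)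
        ↔ (((x::y::t).take (i+1)).reverse = (x::y::t).take (i+1)) := by
      unfold begP
      rw [show 2*((i+1)/2) = i + 1 from by omega]
    rw [Bool.eq_iff_iff]
    simp only [Bool.and_eq_true, beq_iff_eq, decide_eq_true_eq]
    constructor
    · rintro ⟨hpal, _, _⟩
      exact ⟨hbegiff.mpr hpal, hpar⟩
    · rintro ⟨hbeg, _⟩
      refine ⟨hbegiff.mp hbeg, ?_, hpar⟩
      have hdg := endpoint_beg (x::y::t) ((i+1)/2) (by omega) (by simp; omega) hbeg
      rw [show 2*((i+1)/2) - 1 = i from by omega] at hdg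
      simpa using hdg

theorem condA2_eq (x y : Int) (t : List Int) (i : Nat) (h1 : 1 ≤ i) (hi : i ≤ t.length) :
    (is_symmetrical (x::y::t).reverse (((x::y::t).length : Int) - i - 1)
        && ((y::t).dropLast.getD (i-1) 0 == (y::t).getLast!
            && PySem.Int.mod (((x::y::t).length : Int) - i) 2 == 0))
      = (decide (endP (x::y::t) (((x::y::t).length + i)/2))
          && decide (i % 2 = (x::y::t).length % 2)) := by
  have hnt : (x::y::t).length = t.length + 2 := by simp
  rw [parity_cast2 _ i (by omega)]
  by_cases hpar : i % 2 = (x::y::t).length % 2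
  case neg =>
    rw [Bool.eq_iff_iff]
    simp only [Bool.and_eq_true, decide_eq_true_eq]
    constructor
    · rintro ⟨_, _, hp⟩; exact absurd hp hpar
    · rintro ⟨_, hp⟩; exact absurd hp hpar
  case pos =>
    have hpar0 : ((x::y::t).length - i) % 2 = 0 := by omega
    rw [isSym_rev _ i (by omega) hpar0,
        dropLast_getD x (y::t) (i-1) (by simp; omega),
        show i - 1 + 1 = i from by omega]
    have hendiff : endP (x::y::t) (((x::y::t).length + i)/2)
        ↔ (((x::y::t).drop i).reverse = (x::y::t).drop i) := by
      unfold endP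
      rw [show 2*(((x::y::t).length + i)/2) - (x::y::t).length = i from by omega]
    have hlast : (y::t).getLast! = (x::y::t).getD ((x::y::t).length - 1) 0 := by
      rw [getLastBang_getD y t, hnt,
          show t.length + 2 - 1 = t.length + 1 from by omega, List.getD_cons_succ]
      simp
    rw [Bool.eq_iff_iff]
    simp only [Bool.and_eq_true, beq_iff_eq, decide_eq_true_eq]
    constructor
    · rintro ⟨hpal, _, _⟩
      exact ⟨hendiff.mpr hpal, hpar⟩
    · rintro ⟨hend, _⟩
      refine ⟨hendiff.mp hend, ?_, hpar⟩
      have hdg := endpoint_end (x::y::t) (((x::y::t).length + i)/2) (by omega) (by omega) hend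
      rw [show 2*(((x::y::t).length + i)/2) - (x::y::t).length = i from by omega] at hdg
      rw [hlast]
      exact hdg

theorem chunkA1 (x y : Int) (t : List Int) :
    ((List.range' 1 t.length).filter
        (fun i => decide (begP (x::y::t) ((i+1)/2)) && decide (i % 2 = 1))).map
        ((fun candidate => PySem.Int.floordiv candidate 2 + 1) ∘ fun (i : Nat) => (i : Int))
      = ((List.range (((x::y::t).length-1)/2)).filter
          (fun j => decide (begP (x::y::t) (j+1)))).map (fun j => ((j+1 : Nat) : Int)) := by
  rw [show ((x::y::t).length-1)/2 = (t.length+1)/2 from by simp]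
  rw [← List.filter_filter, filter_odd_range' t.length,
      List.filter_map, List.map_map,
      List.range'_eq_map_range, List.filter_map, List.map_map]
  apply map_filter_congr
  intro j hj
  have hjK := List.mem_range.mp hj
  constructor
  · show decide (begP (x::y::t) ((2*(1+j)-1+1)/2)) = decide (begP (x::y::t) (j+1))
    rw [show (2*(1+j)-1+1)/2 = j+1 from by omega]
  · intro _
    show PySem.Int.floordiv ((2*(1+j)-1 : Nat) : Int) 2 + 1 = ((j+1 : Nat) : Int)
    rw [floordiv2_natCast]
    push_cast
    omega

theorem chunkA2 (x y : Int) (t : List Int) :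
    ((List.range' 1 t.length).filter
        (fun i => decide (endP (x::y::t) (((x::y::t).length + i)/2))
            && decide (i % 2 = (x::y::t).length % 2))).map
        ((fun candidate => candidate + PySem.Int.floordiv (((x::y::t).length : Int) - candidate) 2)
          ∘ fun (i : Nat) => (i : Int))
      = ((List.range (((x::y::t).length-1)/2)).filter
          (fun j => decide (endP (x::y::t) ((x::y::t).length - ((x::y::t).length-1)/2 + j)))).map
          (fun j => (((x::y::t).length - ((x::y::t).length-1)/2 + j : Nat) : Int)) := by
  have hn : (x::y::t).length = t.length + 2 := by simp
  rw [← List.filter_filter]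
  by_cases hpar : (x::y::t).length % 2 = 0
  · rw [List.filter_congr (l := List.range' 1 t.length)
        (fun i _ => (by rw [hpar] : (decide (i % 2 = (x::y::t).length % 2)) = (decide (i % 2 = 0)))),
        filter_even_range' t.length,
        show t.length/2 = ((x::y::t).length-1)/2 from by omega,
        List.filter_map, List.map_map,
        List.range'_eq_map_range, List.filter_map, List.map_map]
    apply map_filter_congr
    intro j hj
    have hjK := List.mem_range.mp hj
    constructor
    · show decide (endP (x::y::t) (((x::y::t).length + 2*(1+j))/2)) = _
      rw [show ((x::y::t).length + 2*(1+j))/2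
            = (x::y::t).length - ((x::y::t).length-1)/2 + j from by omega]
    · intro _
      show ((2*(1+j) : Nat) : Int)
            + PySem.Int.floordiv (((x::y::t).length : Int) - ((2*(1+j) : Nat) : Int)) 2
          = (((x::y::t).length - ((x::y::t).length-1)/2 + j : Nat) : Int)
      rw [show (((x::y::t).length : Int) - ((2*(1+j) : Nat) : Int))
            = (((x::y::t).length - 2*(1+j) : Nat) : Int) from by push_cast; omega,
          floordiv2_natCast]
      push_cast
      omega
  · have hpar1 : (x::y::t).length % 2 = 1 := by omega
    rw [List.filter_congr (l := List.range' 1 t.length)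
        (fun i _ => (by rw [hpar1] : (decide (i % 2 = (x::y::t).length % 2)) = (decide (i % 2 = 1)))),
        filter_odd_range' t.length,
        show (t.length+1)/2 = ((x::y::t).length-1)/2 from by omega,
        List.filter_map, List.map_map,
        List.range'_eq_map_range, List.filter_map, List.map_map]
    apply map_filter_congr
    intro j hj
    have hjK := List.mem_range.mp hj
    constructor
    · show decide (endP (x::y::t) (((x::y::t).length + (2*(1+j)-1))/2)) = _
      rw [show ((x::y::t).length + (2*(1+j)-1))/2
            = (x::y::t).length - ((x::y::t).length-1)/2 + j from by omega]
    · intro _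
      show ((2*(1+j)-1 : Nat) : Int)
            + PySem.Int.floordiv (((x::y::t).length : Int) - ((2*(1+j)-1 : Nat) : Int)) 2
          = (((x::y::t).length - ((x::y::t).length-1)/2 + j : Nat) : Int)
      rw [show (((x::y::t).length : Int) - ((2*(1+j)-1 : Nat) : Int))
            = (((x::y::t).length - (2*(1+j)-1) : Nat) : Int) from by push_cast; omega,
          floordiv2_natCast]
      push_cast
      omega

theorem charA (l : List Int) (h2 : 2 ≤ l.length) : find_axis l = canon l := by
  rcases l with _ | ⟨x, _ | ⟨y, t⟩⟩
  · simp at h2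
  · simp at h2
  unfold find_axis
  simp only []
  rw [PySem.List.foldl_append_if, PySem.List.foldl_append_if, List.nil_append]
  rw [guard_filter x _ _ (by
        intro ix h
        simp only [Bool.and_eq_true, beq_iff_eq] at h
        exact h.1),
      guard_filter ((y :: t).getLast!) _ _ (by
        intro ix h
        simp only [Bool.and_eq_true, beq_iff_eq] at h
        exact h.1)]
  rw [enum_filter_fst_one, enum_filter_fst_one]
  rw [List.filter_map, List.filter_map, List.map_map, List.map_map,
      List.filter_filter, List.filter_filter]
  simp only [Function.comp_apply]
  rw [show (y :: t).dropLast.length = t.length from by simp]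
  rw [List.filter_congr
        (p := fun a => is_symmetrical (x::y::t) ((a : Nat) : Int)
          && ((y::t).dropLast.getD (a-1) 0 == x && PySem.Int.mod ((a : Nat) : Int) 2 == 1))
        (q := fun a => decide (begP (x::y::t) ((a+1)/2)) && decide (a % 2 = 1))
        (fun a ha => by
          have hm := List.mem_range'_1.mp ha
          exact condA1_eq x y t a hm.1 (by omega))]
  rw [List.filter_congr
        (p := fun a => is_symmetrical (x::y::t).reverse (((x::y::t).length : Int) - (a : Nat) - 1)
          && ((y::t).dropLast.getD (a-1) 0 == (y::t).getLast!
              && PySem.Int.mod (((x::y::t).length : Int) - (a : Nat)) 2 == 0))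
        (q := fun a => decide (endP (x::y::t) (((x::y::t).length + a)/2))
          && decide (a % 2 = (x::y::t).length % 2))
        (fun a ha => by
          have hm := List.mem_range'_1.mp ha
          exact condA2_eq x y t a hm.1 (by omega))]
  rw [chunkA1 x y t, chunkA2 x y t]
  rfl

theorem center_not_mem_canon (l : List Int) (h2 : 2 ≤ l.length) (hev : l.length % 2 = 0) :
    ((l.length/2 : Nat) : Int) ∉ canon l := by
  unfold canon
  intro hmem
  rcases List.mem_append.mp hmem with h | h <;> obtain ⟨j, hj, hval⟩ := List.mem_map.mp h
  · have hjr := List.mem_range.mp (List.mem_filter.mp hj).1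
    have : j + 1 = l.length/2 := by exact_mod_cast hval
    omega
  · have hjr := List.mem_range.mp (List.mem_filter.mp hj).1
    have : l.length - (l.length-1)/2 + j = l.length/2 := by exact_mod_cast hval
    omega

theorem center_mem_alt (l : List Int) (h2 : 2 ≤ l.length) (hev : l.length % 2 = 0)
    (hpal : l.reverse = l) : ((l.length/2 : Nat) : Int) ∈ find_axis_alt l := by
  rw [find_axis_alt_eq_filter]
  apply List.mem_filter.mpr
  constructor
  · apply PySem.List.mem_pyRange_one.mpr
    constructor
    · exact_mod_cast Nat.one_le_iff_ne_zero.mpr (by omega)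
    · exact_mod_cast Nat.div_lt_self (by omega) (by omega)
  · rw [condB_mid l (l.length/2) (by omega) (by omega)]
    simp [hpal]

-- ===== VERDICT (by name: the statement is the Claim_ definition above) =====
theorem find_axis_spec : Claim_unchanged_find_axis := by
  intro l _ hp hnd
  rw [charA l hp, charB l hp (fun hc => hnd ⟨hp, hc.1, hc.2⟩)]

theorem find_axis_changed : Claim_changed_find_axis := by
  unfold Claim_changed_find_axis; decide

theorem find_axis_tight : Claim_exact_find_axis := by
  intro l _ hp hd heq
  have hmem := center_mem_alt l hp hd.2.1 hd.2.2
  rw [← heq, charA l hp] at hmem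
  exact center_not_mem_canon l hp hd.2.1 hmem
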